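-- pv_equiv track=rewrite | github.com/bruce-workspace/gtmdot-sites | scripts/pipeline-next-prospect.py | pick_next
-- ===== SOURCE A (Python) =====
-- def pick_next(
--     prospects: list[dict],
--     done_ids: set[str],
--     priority_ids: set[str],
-- ) -> dict | None:
--     undone = [p for p in prospects if p["id"] not in done_ids]
--     if not undone:
--         return None
--
--     if priority_ids:
--         pri = [p for p in undone if p["id"] in priority_ids]
--         rest = [p for p in undone if p["id"] not in priority_ids]
--         ordered = pri + rest
--     else:
--         ordered = undone
--
--     return ordered[0]
-- ===== SOURCE B (Python) =====
-- def pick_next(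
--     prospects: list[dict],
--     done_ids: set[str],
--     priority_ids: set[str],
-- ) -> dict | None:
--     candidates = [(i, p) for i, p in enumerate(prospects) if p["id"] not in done_ids]
--     if not candidates:
--         return None
--     return min(
--         candidates,
--         key=lambda ip: (1 if priority_ids and ip[1]["id"] not in priority_ids else 0, ip[0]),
--     )[1]
-- ===== Notes on version B (the rewrite author's own statement) =====
-- stated objective: alternative
-- what changed: Instead of building three filtered lists and concatenating (priority ones first) to take index 0, B enumerates the undone prospects once and selects the result as an argmin via min() with a lexicographic (rank, index) key, rank 0 for priority prospects.
import Mathlib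
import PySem

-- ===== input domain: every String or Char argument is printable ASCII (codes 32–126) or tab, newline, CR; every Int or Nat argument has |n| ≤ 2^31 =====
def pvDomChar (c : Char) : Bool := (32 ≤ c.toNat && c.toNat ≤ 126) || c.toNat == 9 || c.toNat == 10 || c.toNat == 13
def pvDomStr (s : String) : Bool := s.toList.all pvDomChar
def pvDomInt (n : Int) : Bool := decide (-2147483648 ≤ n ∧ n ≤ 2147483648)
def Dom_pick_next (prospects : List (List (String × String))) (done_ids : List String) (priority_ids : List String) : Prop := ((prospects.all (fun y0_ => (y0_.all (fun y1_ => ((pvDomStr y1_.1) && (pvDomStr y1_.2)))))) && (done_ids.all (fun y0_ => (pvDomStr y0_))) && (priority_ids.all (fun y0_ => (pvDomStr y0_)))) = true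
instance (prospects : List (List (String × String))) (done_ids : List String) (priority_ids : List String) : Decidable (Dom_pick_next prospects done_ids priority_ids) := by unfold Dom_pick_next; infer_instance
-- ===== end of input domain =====

-- B replaces A's filter/partition/concatenate-and-take-index-0 with an argmin: min() over the
-- enumerated undone prospects under a lexicographic (rank, index) key (objective: alternative).
-- Pre_ excludes prospects lacking an "id" key, where A (and B) raise KeyError.

-- ===== PORT A =====
-- p["id"] under Pre_ (key present); getD "" is never taken inside Pre_.
def pvGetId (p : List (String × String)) : String := ((PySem.Dict.mk p).get? "id").getD ""

def pick_next (prospects : List (List (String × String))) (done_ids : List String) (priority_ids : List String) : Option (List (String × String)) :=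
  let undone := prospects.filter (fun p => !(done_ids.contains (pvGetId p)))
  if undone.isEmpty then none
  else
    let ordered :=
      if !priority_ids.isEmpty then
        (undone.filter (fun p => priority_ids.contains (pvGetId p))) ++
        (undone.filter (fun p => !(priority_ids.contains (pvGetId p))))
      else undone
    PySem.List.pyGet? ordered 0

-- ===== PORT B =====
-- the key of Source B's lambda: (rank, index); rank = 1 if priority_ids and id not in priority_ids else 0
def pvRank (priority_ids : List String) (p : List (String × String)) : Int :=
  if !priority_ids.isEmpty && !(priority_ids.contains (pvGetId p)) then 1 else 0

def pick_next_alt (prospects : List (List (String × String))) (done_ids : List String) (priority_ids : List String) : Option (List (String × String)) :=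
  let candidates := (PySem.List.enumerate prospects).filter (fun ip => !(done_ids.contains (pvGetId ip.2)))
  if candidates.isEmpty then none
  else
    match PySem.List.min2? candidates (fun ip => pvRank priority_ids ip.2) (fun ip => ip.1) with
    | none => none
    | some ip => some ip.2

-- ===== PRECONDITION & SPEC =====
-- Pre_ excludes prospects without an "id" key, on which both A and B raise KeyError.
def Pre_pick_next (prospects : List (List (String × String))) (done_ids : List String) (priority_ids : List String) : Prop :=
  ∀ p ∈ prospects, ((PySem.Dict.mk p).get? "id").isSome
instance (prospects : List (List (String × String))) (done_ids : List String) (priority_ids : List String) : Decidable (Pre_pick_next prospects done_ids priority_ids) := by unfold Pre_pick_next; infer_instance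
def pvWitness_pick_next : (List (List (String × String))) × List String × List String :=
  ([[("id", "a")], [("id", "b")]], ["b"], ["a"])
def Spec_pick_next (prospects : List (List (String × String))) (done_ids : List String) (priority_ids : List String) (out : Option (List (String × String))) : Prop := out = pick_next_alt prospects done_ids priority_ids
instance (prospects : List (List (String × String))) (done_ids : List String) (priority_ids : List String) (out : Option (List (String × String))) : Decidable (Spec_pick_next prospects done_ids priority_ids out) := by unfold Spec_pick_next; infer_instance

-- ===== CLAIM (what is proved, stated in full; the proofs are below) =====
def Claim_equal_pick_next : Prop := ∀ (prospects : List (List (String × String))) (done_ids : List String) (priority_ids : List String), Dom_pick_next prospects done_ids priority_ids → Pre_pick_next prospects done_ids priority_ids → Spec_pick_next prospects done_ids priority_ids (pick_next prospects done_ids priority_ids)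

-- ===== LEMMAS AND PROOFS =====

-- once the accumulator holds a minimal element (no later element beats it), the fold keeps it
theorem pvFold_keep {α : Type} (k1 k2 : α → Int) (m : α) :
    ∀ t : List α, (∀ x ∈ t, ¬(k1 x < k1 m) ∧ ¬(k2 x < k2 m)) →
      t.foldl (fun acc x =>
        match acc with
        | none => some x
        | some m' => if (decide (k1 x < k1 m') || !decide (k1 m' < k1 x) && decide (k2 x < k2 m')) = true then some x else some m') (some m) = some m := by
  intro t
  induction t with
  | nil => intro _; rfl
  | cons x t ih =>
    intro h
    have hx := h x (List.mem_cons_self)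
    simp only [List.foldl_cons]
    have : (decide (k1 x < k1 m) || !decide (k1 m < k1 x) && decide (k2 x < k2 m)) = false := by
      rcases hx with ⟨h1, h2⟩
      simp [h1, h2]
    rw [if_neg (by simp [this])]
    exact ih (fun y hy => h y (List.mem_cons_of_mem _ hy))

-- min2? over a list with 0/1 ranks and strictly increasing second key = first rank-0 element, else head
theorem pvMin2_char {α : Type} (k1 k2 : α → Int) :
    ∀ l : List α, l.Pairwise (fun a b => k2 a < k2 b) → (∀ x ∈ l, k1 x = 0 ∨ k1 x = 1) →
      PySem.List.min2? l k1 k2 =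
        ((l.filter (fun x => k1 x = 0)).head?).or l.head? := by
  intro l
  induction l with
  | nil => intro _ _; rfl
  | cons x t ih =>
    intro hpw hr
    rcases List.pairwise_cons.mp hpw with ⟨hxlt, hpt⟩
    rcases hr x (List.mem_cons_self) with h0 | h1
    · -- head has rank 0: it wins immediately and is kept forever
      have hkeep : ∀ y ∈ t, ¬(k1 y < k1 x) ∧ ¬(k2 y < k2 x) := by
        intro y hy
        constructor
        · rcases hr y (List.mem_cons_of_mem _ hy) with h | h <;> omega
        · exact not_lt.mpr (le_of_lt (hxlt y hy))
      simp only [PySem.List.min2?, List.foldl_cons]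
      refine Eq.trans (pvFold_keep k1 k2 x t hkeep) ?_
      simp [h0]
    · -- head has rank 1
      have hrec := ih hpt (fun y hy => hr y (List.mem_cons_of_mem _ hy))
      simp only [PySem.List.min2?, List.foldl_cons] at hrec ⊢
      -- fold over t starting from (some x, rank 1) equals first rank-0 of t, else x
      have key : ∀ (t' : List α), t'.Pairwise (fun a b => k2 a < k2 b) → (∀ y ∈ t', k1 y = 0 ∨ k1 y = 1) →
          (∀ y ∈ t', k2 x < k2 y) →
          t'.foldl (fun acc y =>
            match acc with
            | none => some y
            | some m' => if (decide (k1 y < k1 m') || !decide (k1 m' < k1 y) && decide (k2 y < k2 m')) = true then some y else some m') (some x) =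
          ((t'.filter (fun y => k1 y = 0)).head?).or (some x) := by
        intro t'
        induction t' with
        | nil => intro _ _ _; rfl
        | cons y t' ih' =>
          intro hpw' hr' hgt'
          rcases List.pairwise_cons.mp hpw' with ⟨hylt, hpt'⟩
          rcases hr' y (List.mem_cons_self) with hy0 | hy1
          · -- y has rank 0: it takes over and is kept
            simp only [List.foldl_cons]
            have hstep : (decide (k1 y < k1 x) || !decide (k1 x < k1 y) && decide (k2 y < k2 x)) = true := by
              simp [hy0, h1]
            rw [if_pos hstep]
            have hkeep : ∀ z ∈ t', ¬(k1 z < k1 y) ∧ ¬(k2 z < k2 y) := by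
              intro z hz
              constructor
              · rcases hr' z (List.mem_cons_of_mem _ hz) with h | h <;> omega
              · exact not_lt.mpr (le_of_lt (hylt z hz))
            rw [pvFold_keep k1 k2 y t' hkeep]
            simp [hy0]
          · -- y has rank 1: x is kept (k1 y = k1 x = 1, k2 x < k2 y)
            simp only [List.foldl_cons]
            have hstep : (decide (k1 y < k1 x) || !decide (k1 x < k1 y) && decide (k2 y < k2 x)) = false := by
              have := hgt' y (List.mem_cons_self)
              simp [hy1, h1]; omega
            rw [if_neg (by simp [hstep])]
            rw [ih' hpt' (fun z hz => hr' z (List.mem_cons_of_mem _ hz))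
                  (fun z hz => hgt' z (List.mem_cons_of_mem _ hz))]
            simp [hy1]
      refine Eq.trans (key t hpt (fun y hy => hr y (List.mem_cons_of_mem _ hy)) hxlt) ?_
      simp [h1]

theorem filter_not_of_filter_nil {α : Type} (q : α → Bool) :
    ∀ l : List α, l.filter q = [] → l.filter (fun x => !(q x)) = l := by
  intro l h
  rw [List.filter_eq_nil_iff] at h
  rw [List.filter_eq_self]
  intro x hx; simpa using h x hx

theorem pvPyGet_cons_zero {α : Type} (a : α) (l : List α) :
    PySem.List.pyGet? (a :: l) 0 = some a := by
  simp [PySem.List.pyGet?, PySem.List.pyIdx?]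

-- ===== VERDICT (by name: the statement is the Claim_ definition above) =====
theorem pick_next_spec : Claim_equal_pick_next := by
  intro prospects done_ids priority_ids _ _
  unfold Spec_pick_next
  show pick_next prospects done_ids priority_ids = _
  simp only [pick_next, pick_next_alt]
  -- candidates of B and undone of A
  set pred := fun p : List (String × String) => !(done_ids.contains (pvGetId p)) with hpred
  rw [show (fun ip : Int × List (String × String) => !(done_ids.contains (pvGetId ip.2))) = (fun ip => pred ip.2) from rfl]
  have hmap : ((PySem.List.enumerate prospects).filter (fun ip => pred ip.2)).map (·.2)
      = prospects.filter pred := by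
    have := PySem.List.map_snd_enumerate prospects 0
    calc ((PySem.List.enumerate prospects).filter (fun ip => pred ip.2)).map (·.2)
        = ((PySem.List.enumerate prospects).map (·.2)).filter pred := by
          rw [List.filter_map]; rfl
      _ = prospects.filter pred := by rw [this]
  have hpw : ((PySem.List.enumerate prospects).filter (fun ip => pred ip.2)).Pairwise
      (fun a b => a.1 < b.1) :=
    (PySem.List.pairwise_lt_enumerate prospects 0).filter _
  have hrk : ∀ ip ∈ (PySem.List.enumerate prospects).filter (fun ip => pred ip.2),
      pvRank priority_ids ip.2 = 0 ∨ pvRank priority_ids ip.2 = 1 := by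
    intro ip _; unfold pvRank; split <;> simp
  rw [pvMin2_char (fun ip : Int × List (String × String) => pvRank priority_ids ip.2) (fun ip => ip.1) ((PySem.List.enumerate prospects).filter (fun ip => pred ip.2)) hpw hrk]
  -- relate filters and heads through the map
  by_cases hund : (prospects.filter pred).isEmpty
  · have : ((PySem.List.enumerate prospects).filter (fun ip => pred ip.2)) = [] := by
      have := hmap
      rcases hc : (PySem.List.enumerate prospects).filter (fun ip => pred ip.2) with _ | ⟨a, t⟩
      · exact hc
      · exfalso; rw [hc] at this; rw [List.isEmpty_iff] at hund
        rw [hund] at this; simp at this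
    simp [hund, this]
  · rcases hc : (PySem.List.enumerate prospects).filter (fun ip => pred ip.2) with _ | ⟨c, cs⟩
    · exfalso; rw [hc] at hmap; rw [List.isEmpty_iff] at hund
      exact hund (by simpa using hmap.symm)
    rw [hc] at hmap ⊢
    rcases hu : prospects.filter pred with _ | ⟨u, us⟩
    · exfalso; rw [hu] at hmap; simp at hmap
    simp only [List.isEmpty_cons, Bool.false_eq_true, if_false]
    -- heads correspond: (c :: cs).map snd = u :: us
    rw [hu] at hmap
    have hhead : c.2 = u := by
      have := congrArg List.head? hmap; simpa using this
    by_cases hpe : priority_ids.isEmpty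
    · -- rank is 0 everywhere; filter rank0 = whole list
      have hall : (c :: cs).filter (fun ip => decide (pvRank priority_ids ip.2 = 0)) = c :: cs := by
        rw [List.filter_eq_self]; intro ip _
        simp [pvRank, hpe]
      simp only [hpe, Bool.not_true, Bool.false_eq_true, hall]
      simp [hhead]
    · -- priority nonempty: rank0 ↔ contains
      have hrkiff : ∀ ip : Int × List (String × String),
          (decide (pvRank priority_ids ip.2 = 0)) = priority_ids.contains (pvGetId ip.2) := by
        intro ip; unfold pvRank
        by_cases h : pvGetId ip.2 ∈ priority_ids <;> simp [hpe, h]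
      have hfil : ((c :: cs).filter (fun ip => decide (pvRank priority_ids ip.2 = 0))).map (·.2)
          = (u :: us).filter (fun p => priority_ids.contains (pvGetId p)) := by
        calc ((c :: cs).filter (fun ip => decide (pvRank priority_ids ip.2 = 0))).map (·.2)
            = ((c :: cs).filter (fun ip => priority_ids.contains (pvGetId ip.2))).map (·.2) := by
              congr 1; apply List.filter_congr; intro ip _; exact hrkiff ip
          _ = ((c :: cs).map (·.2)).filter (fun p => priority_ids.contains (pvGetId p)) := by
              rw [List.filter_map]; rfl
          _ = (u :: us).filter (fun p => priority_ids.contains (pvGetId p)) := by rw [hmap]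
      simp only [hpe, Bool.not_false, if_pos]
      rcases hpri : (u :: us).filter (fun p => priority_ids.contains (pvGetId p)) with _ | ⟨q, qs⟩
      · -- no priority among undone
        have hcf : (c :: cs).filter (fun ip => decide (pvRank priority_ids ip.2 = 0)) = [] := by
          rcases hx : (c :: cs).filter (fun ip => decide (pvRank priority_ids ip.2 = 0)) with _ | ⟨a, t⟩
          · exact hx
          · exfalso; rw [hx, hpri] at hfil; simp at hfil
        have hrest : (u :: us).filter (fun p => !(priority_ids.contains (pvGetId p))) = u :: us :=
          filter_not_of_filter_nil _ _ hpri
        rw [hcf]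
        simp only [List.head?_nil, Option.none_or, List.head?_cons]
        rw [hrest, List.nil_append, pvPyGet_cons_zero, hhead]
      · -- some priority among undone: heads q correspond
        rcases hx : (c :: cs).filter (fun ip => decide (pvRank priority_ids ip.2 = 0)) with _ | ⟨a, t⟩
        · exfalso; rw [hx, hpri] at hfil; simp at hfil
        have ha : a.2 = q := by
          rw [hx, hpri] at hfil
          have := congrArg List.head? hfil; simpa using this
        rw [hx]
        simp only [List.head?_cons, Option.some_or]
        rw [List.cons_append, pvPyGet_cons_zero, ha]
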